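-- pv_equiv track=rewrite | github.com/NeuralBlitz/fishstick | fishstick/knowledge_graph/reasoning.py | _compute_support
-- ===== SOURCE A (Python) =====
-- from typing import Dict, List, Set, Tuple, Optional, Callable, Any
--
-- def _compute_support(
--
--     head: Tuple[str, str, str],
--     body: List[Tuple[str, str, str]],
--     triplet_set: Set[Tuple[str, str, str]],
-- ) -> int:
--     head_s, head_r, head_o = head
--
--     grounding_count = 0
--
--     entities = list(set([head_s, head_o] + [e for t in body for e in [t[0], t[2]]]))
--
--     for e in entities:
--         grounded_body = []
--         valid = True
--
--         for s, p, o in body: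
--             new_s = e if s == "?" else s
--             new_o = e if o == "?" else o
--
--             if (new_s, p, new_o) not in triplet_set:
--                 valid = False
--                 break
--
--         if valid:
--             grounding_count += 1
--
--     return grounding_count
-- ===== SOURCE B (Python) =====
-- def _compute_support(head, body, triplet_set):
--     head_s, head_r, head_o = head
--     candidates = {head_s, head_o}
--     for s, p, o in body:
--         candidates.add(s)
--         candidates.add(o)
--     for s, p, o in body:
--         if not candidates:
--             break
--         candidates = {e for e in candidates
--                       if (e if s == "?" else s, p, e if o == "?" else o) in triplet_set}
--     return len(candidates)
-- ===== Notes on version B (the rewrite author's own statement) =====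
-- stated objective: alternative
-- what changed: Reversed loop nesting: instead of a per-entity inner scan of the body with a valid flag, B builds the candidate entity set once and repeatedly intersects it with the entities satisfying each body triple, breaking early when it empties, returning the final set's size.
import Mathlib
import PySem

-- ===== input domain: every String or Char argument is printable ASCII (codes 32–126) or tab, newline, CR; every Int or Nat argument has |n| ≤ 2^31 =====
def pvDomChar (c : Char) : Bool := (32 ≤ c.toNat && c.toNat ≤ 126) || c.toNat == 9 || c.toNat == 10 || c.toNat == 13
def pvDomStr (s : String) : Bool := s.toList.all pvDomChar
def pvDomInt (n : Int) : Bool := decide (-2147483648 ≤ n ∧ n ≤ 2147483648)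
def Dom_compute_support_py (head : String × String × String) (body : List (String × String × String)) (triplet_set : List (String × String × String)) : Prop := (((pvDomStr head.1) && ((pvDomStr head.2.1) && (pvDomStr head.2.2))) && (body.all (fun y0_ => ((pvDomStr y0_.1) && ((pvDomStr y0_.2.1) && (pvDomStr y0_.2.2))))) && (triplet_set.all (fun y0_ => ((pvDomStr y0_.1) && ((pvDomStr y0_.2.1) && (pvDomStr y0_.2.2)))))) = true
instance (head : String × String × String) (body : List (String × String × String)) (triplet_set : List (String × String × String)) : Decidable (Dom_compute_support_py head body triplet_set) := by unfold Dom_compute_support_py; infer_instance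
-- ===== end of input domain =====

-- B reverses the loop nesting: it builds the candidate entity set once and intersects it
-- per body triple (early break on empty), instead of a per-entity all-check (objective: alternative).


-- ===== PORT A =====
-- inner 'for s, p, o in body: … break' with the 'valid' flag, as structural recursion
def pvAValid (e : String) (body : List (String × String × String)) (triplet_set : List (String × String × String)) : Bool :=
  match body with
  | [] => true
  | (s, p, o) :: rest =>
    let new_s := if s == "?" then e else s
    let new_o := if o == "?" then e else o
    if !(triplet_set.contains (new_s, p, new_o)) then false
    else pvAValid e rest triplet_set

def compute_support_py (head : String × String × String) (body : List (String × String × String)) (triplet_set : List (String × String × String)) : Int :=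
  let head_s := head.1
  let head_o := head.2.2
  -- list(set([head_s, head_o] + [e for t in body for e in [t[0], t[2]]])); only its length-after-filter
  -- is used, which is iteration-order independent, so PySem.Set's order is exact here
  let entities : PySem.Set String := PySem.Set.ofList ([head_s, head_o] ++ body.flatMap (fun t => [t.1, t.2.2]))
  entities.foldl (fun acc e => if pvAValid e body triplet_set then acc + 1 else acc) (0 : Int)

-- ===== PORT B =====
-- the intersection loop: per body triple, shrink the candidate set; break when empty
def pvBLoop (body : List (String × String × String)) (cands : PySem.Set String) (triplet_set : List (String × String × String)) : PySem.Set String :=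
  match body with
  | [] => cands
  | (s, p, o) :: rest =>
    if cands.isEmpty then cands
    else pvBLoop rest (cands.filter (fun e => triplet_set.contains ((if s == "?" then e else s), p, (if o == "?" then e else o)))) triplet_set

def compute_support_py_alt (head : String × String × String) (body : List (String × String × String)) (triplet_set : List (String × String × String)) : Int :=
  let cands0 : PySem.Set String := body.foldl (fun st t => PySem.Set.add (PySem.Set.add st t.1) t.2.2) (PySem.Set.ofList [head.1, head.2.2])
  ((pvBLoop body cands0 triplet_set).length : Int)

-- ===== PRECONDITION & SPEC =====
def Spec_compute_support_py (head : String × String × String) (body : List (String × String × String)) (triplet_set : List (String × String × String)) (out : Int) : Prop := out = compute_support_py_alt head body triplet_set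
instance (head : String × String × String) (body : List (String × String × String)) (triplet_set : List (String × String × String)) (out : Int) : Decidable (Spec_compute_support_py head body triplet_set out) := by unfold Spec_compute_support_py; infer_instance

-- ===== CLAIM (what is proved, stated in full; the proofs are below) =====
def Claim_equal_compute_support_py : Prop := ∀ (head : String × String × String) (body : List (String × String × String)) (triplet_set : List (String × String × String)), Dom_compute_support_py head body triplet_set → Spec_compute_support_py head body triplet_set (compute_support_py head body triplet_set)

-- ===== LEMMAS AND PROOFS =====

-- the per-triple check both programs make on entity e
def pvCheck (triplet_set : List (String × String × String)) (e : String) (t : String × String × String) : Bool :=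
  triplet_set.contains ((if t.1 == "?" then e else t.1), t.2.1, (if t.2.2 == "?" then e else t.2.2))

theorem pvAValid_eq_all (e : String) (body : List (String × String × String)) (ts : List (String × String × String)) :
    pvAValid e body ts = body.all (pvCheck ts e) := by
  induction body with
  | nil => rfl
  | cons t rest ih =>
    obtain ⟨s, p, o⟩ := t
    simp only [pvAValid, List.all_cons, pvCheck, ih]
    by_cases h : ts.contains ((if s == "?" then e else s), p, (if o == "?" then e else o)) <;> simp_all

theorem pvFoldlCount (p : String → Bool) (l : List String) (acc : Int) :
    l.foldl (fun acc e => if p e then acc + 1 else acc) acc = acc + (l.countP p : Int) := by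
  induction l generalizing acc with
  | nil => simp
  | cons x xs ih =>
    simp only [List.foldl_cons, List.countP_cons, ih]
    by_cases h : p x
    · simp [h]; omega
    · simp [h]

theorem pvBLoop_eq_filter (ts : List (String × String × String)) (body : List (String × String × String)) (cands : List String) :
    pvBLoop body cands ts = cands.filter (fun e => body.all (pvCheck ts e)) := by
  induction body generalizing cands with
  | nil => simp [pvBLoop]
  | cons t rest ih =>
    obtain ⟨s, p, o⟩ := t
    simp only [pvBLoop]
    by_cases h : cands.isEmpty
    · simp only [if_pos h]
      rw [List.isEmpty_iff.mp h]
      rfl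
    · rw [if_neg h, ih, List.filter_filter]
      apply List.filter_congr
      intro e _
      simp [pvCheck, Bool.and_comm]

-- B's foldl of two adds equals Set.ofList of A's flattened list (same start set)
theorem pvCands_eq (body : List (String × String × String)) (s : PySem.Set String) :
    body.foldl (fun st t => PySem.Set.add (PySem.Set.add st t.1) t.2.2) s
      = (body.flatMap (fun t => [t.1, t.2.2])).foldl PySem.Set.add s := by
  induction body generalizing s with
  | nil => rfl
  | cons t rest ih => simp [List.foldl_cons, ih]

-- ===== VERDICT (by name: the statement is the Claim_ definition above) =====
theorem compute_support_py_spec : Claim_equal_compute_support_py := by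
  intro head body ts _
  unfold Spec_compute_support_py compute_support_py compute_support_py_alt
  have hupd : PySem.Set.ofList ([head.1, head.2.2] ++ body.flatMap (fun t => [t.1, t.2.2]))
      = (body.flatMap (fun t => [t.1, t.2.2])).foldl PySem.Set.add (PySem.Set.ofList [head.1, head.2.2]) := by
    simp [PySem.Set.ofList_eq_foldl]
  simp only [pvCands_eq, pvBLoop_eq_filter, pvFoldlCount, hupd, zero_add,
    List.countP_eq_length_filter]
  congr 1
  congr 1
  apply List.filter_congr
  intro e _
  rw [pvAValid_eq_all]
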